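-- pv_equiv track=rewrite | github.com/GoCodingIcreated/newspapper | alert/telegram/server.py | escape_characters
-- ===== SOURCE A (Python) =====
-- def escape_characters(msg):
--     characters = [
--         ("&", "&amp;"),
--         ("<", "&lt;"),
--         (">", "&gt;"),
--     ]
--     for item in characters:
--         msg = msg.replace(item[0], item[1])
--     return msg
-- ===== SOURCE B (Python) =====
-- _TABLE = str.maketrans({"&": "&amp;", "<": "&lt;", ">": "&gt;"})
--
--
-- def escape_characters(msg):
--     return msg.translate(_TABLE)
-- ===== Notes on version B (the rewrite author's own statement) =====
-- stated objective: idiomatic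
-- what changed: Replaces three sequential full-string .replace passes with a single str.translate pass over a precomputed character translation table.
import Mathlib
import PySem

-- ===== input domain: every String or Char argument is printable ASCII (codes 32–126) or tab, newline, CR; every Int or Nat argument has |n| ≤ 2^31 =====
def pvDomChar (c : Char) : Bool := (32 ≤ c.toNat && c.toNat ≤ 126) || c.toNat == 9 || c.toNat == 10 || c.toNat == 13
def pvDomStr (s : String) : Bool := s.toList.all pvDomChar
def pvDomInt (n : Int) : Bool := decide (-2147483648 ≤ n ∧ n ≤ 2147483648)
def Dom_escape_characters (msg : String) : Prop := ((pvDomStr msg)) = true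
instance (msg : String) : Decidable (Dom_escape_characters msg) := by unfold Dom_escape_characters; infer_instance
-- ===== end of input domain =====

-- B replaces A's three sequential .replace passes with one str.translate pass over a table (idiomatic, single pass).

-- ===== PORT A =====
def escape_characters (msg : String) : String :=
  -- for item in [("&","&amp;"),("<","&lt;"),(">","&gt;")]: msg = msg.replace(item[0], item[1])
  [("&", "&amp;"), ("<", "&lt;"), (">", "&gt;")].foldl
    (fun m item => PySem.Str.replace m item.1 item.2) msg

-- ===== PORT B =====
-- str.maketrans({'&':'&amp;','<':'&lt;','>':'&gt;'}): the translation table as a function Char → List Char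
def pvEscTable (c : Char) : List Char :=
  if c = '&' then "&amp;".toList
  else if c = '<' then "&lt;".toList
  else if c = '>' then "&gt;".toList
  else [c]

-- msg.translate(_TABLE): one pass, each char mapped through the table (exact hand port of str.translate on str-valued table entries)
def escape_characters_alt (msg : String) : String :=
  String.ofList (msg.toList.flatMap pvEscTable)

-- ===== PRECONDITION & SPEC =====
def Spec_escape_characters (msg : String) (out : String) : Prop := out = escape_characters_alt msg
instance (msg : String) (out : String) : Decidable (Spec_escape_characters msg out) := by unfold Spec_escape_characters; infer_instance

-- ===== CLAIM (what is proved, stated in full; the proofs are below) =====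
def Claim_equal_escape_characters : Prop := ∀ (msg : String), Dom_escape_characters msg → Spec_escape_characters msg (escape_characters msg)

-- ===== LEMMAS AND PROOFS =====

-- replace with a single-char pattern is a per-character flatMap
theorem replace_go_single (o : Char) (new : List Char) :
    ∀ (l : List Char) (fuel : Nat) (acc : List Char), l.length ≤ fuel →
      PySem.Chars.replace.go [o] new fuel l acc
        = acc.reverse ++ l.flatMap (fun c => if c = o then new else [c]) := by
  intro l
  induction l with
  | nil =>
    intro fuel acc _
    cases fuel <;> simp [PySem.Chars.replace.go]
  | cons c t ih =>
    intro fuel acc hle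
    cases fuel with
    | zero => simp at hle
    | succ f =>
      have ht : t.length ≤ f := by simpa using hle
      by_cases hco : c = o
      · subst hco
        have hpref : [c].isPrefixOf (c :: t) = true := by
          simp [List.isPrefixOf]
        simp only [PySem.Chars.replace.go, hpref, if_pos]
        simp only [List.length_cons, List.length_nil, Nat.zero_add, List.drop_succ_cons, List.drop_zero]
        rw [ih f (new.reverse ++ acc) (by simpa using ht)]
        simp
      · have hpref : [o].isPrefixOf (c :: t) = false := by
          simp [List.isPrefixOf]
          exact fun h => hco h.symm
        simp only [PySem.Chars.replace.go, hpref]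
        rw [ih f (c :: acc) ht]
        simp [hco]

theorem replace_single (s : List Char) (o : Char) (new : List Char) :
    PySem.Chars.replace s [o] new = s.flatMap (fun c => if c = o then new else [c]) := by
  rw [PySem.Chars.replace]
  simp only [List.isEmpty_cons, Bool.false_eq_true, if_false]
  simpa using replace_go_single o new s s.length [] le_rfl

-- ===== VERDICT (by name: the statement is the Claim_ definition above) =====
theorem escape_characters_spec : Claim_equal_escape_characters := by
  intro msg _
  unfold Spec_escape_characters escape_characters escape_characters_alt
  simp only [List.foldl_cons, List.foldl_nil]
  simp only [PySem.Str.replace, String.toList_ofList]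
  rw [show ("&" : String).toList = ['&'] from rfl, show ("<" : String).toList = ['<'] from rfl,
      show (">" : String).toList = ['>'] from rfl]
  rw [replace_single, replace_single, replace_single]
  rw [List.flatMap_assoc, List.flatMap_assoc]
  congr 1
  apply List.flatMap_congr
  intro c _
  by_cases h1 : c = '&'
  · subst h1; decide
  · by_cases h2 : c = '<'
    · subst h2; decide
    · by_cases h3 : c = '>'
      · subst h3; decide
      · simp [pvEscTable, h1, h2, h3]
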